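-- pv_equiv track=rewrite | github.com/alexandraback/datacollection | solutions_5686313294495744_0/Python/eidanch/C.py | solve
-- ===== SOURCE A (Python) =====
-- from itertools import combinations
--
-- def relatively_fake(pair, lst):
--     w1, w2 = pair
--     mark1, mark2 = False, False
--     for z1, z2 in lst:
--         if (w1,w2) == (z1,z2):
--             continue
--         if w1 == z1:
--             mark1 = True
--         if w2 == z2:
--             mark2 = True
--     return mark1 and mark2
--
-- def solve(lst):
--     """
--     r = 0
--     for w1, w2 in lst:
--         mark1, mark2 = False, False
--         for z1, z2 in lst:
--             if (w1,w2) == (z1,z2):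
--                 continue
--             if w1 == z1:
--                 mark1 = True
--             if w2 == z2:
--                 mark2 = True
--         if mark1 and mark2:
--             r += 1
--     return r
--     """
--     st = set(lst)
--     for r in range(len(lst), -1, -1):
--         for fakes in combinations(st, r):
--             reals = st - set(fakes)
--             if all(relatively_fake(pair, reals) for pair in fakes):
--                 return r
--     assert False
-- ===== SOURCE B (Python) =====
-- def solve(lst):
--     pts = list(dict.fromkeys(lst))
--     rows = list(dict.fromkeys(x for x, _ in pts))
--     cols = list(dict.fromkeys(y for _, y in pts))
--
--     def best(todo, covered):
--         # max, over one chosen column per remaining row (picked from that row's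
--         # points), of the number of distinct columns in `covered` plus the picks
--         if not todo:
--             return len(covered)
--         x = todo[0]
--         res = 0
--         for px, py in pts:
--             if px == x:
--                 v = best(todo[1:], covered if py in covered else covered + [py])
--                 if v > res:
--                     res = v
--         return res
--
--     return len(pts) - len(rows) - len(cols) + best(rows, [])
-- ===== Notes on version B (the rewrite author's own statement) =====
-- stated objective: faster
-- what changed: A searches subset sizes downward, enumerating all combinations of candidate fake points and re-checking row/column witnesses per pair; B computes the same answer as |distinct points| - |rows| - |cols| + m, where m (the largest number of distinct columns obtainable by picking one witness column per row, i.e. a maximum row-column matching) is found by branching only over the columns adjacent to each row, which is the size complement of a minimum witness (edge-cover) set.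
import Mathlib
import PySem

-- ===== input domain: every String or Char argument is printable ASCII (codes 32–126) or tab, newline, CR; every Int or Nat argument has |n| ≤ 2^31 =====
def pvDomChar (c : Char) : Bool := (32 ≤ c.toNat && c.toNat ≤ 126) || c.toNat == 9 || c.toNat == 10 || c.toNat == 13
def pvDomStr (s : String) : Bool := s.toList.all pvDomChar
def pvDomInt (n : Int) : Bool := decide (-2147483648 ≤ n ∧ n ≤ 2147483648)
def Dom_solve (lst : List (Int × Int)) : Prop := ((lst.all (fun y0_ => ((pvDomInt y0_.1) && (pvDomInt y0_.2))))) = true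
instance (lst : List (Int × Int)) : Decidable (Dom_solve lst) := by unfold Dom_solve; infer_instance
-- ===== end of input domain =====

-- B replaces A's descending search over all subsets of removable points by the dual count:
-- |points| − (minimum kept witness set) computed by branching over one witness column per row.

-- ===== PORT A =====
def relatively_fake (pair : Int × Int) (lst : List (Int × Int)) : Bool :=
  let m := lst.foldl (fun (m : Bool × Bool) z =>
      if pair == z then m
      else (m.1 || pair.1 == z.1, m.2 || pair.2 == z.2)) (false, false)
  m.1 && m.2

def solveLoop (st : PySem.Set (Int × Int)) : List Int → Int
  | [] => 0
  | r :: rs =>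
    if (PySem.List.combinations st r.toNat).any (fun fakes =>
        let reals := PySem.Set.diff st (PySem.Set.ofList fakes)
        fakes.all (fun pair => relatively_fake pair reals))
    then r else solveLoop st rs

def solve (lst : List (Int × Int)) : Int :=
  solveLoop (PySem.Set.ofList lst) (PySem.List.pyRange (lst.length : Int) (-1) (-1))

-- ===== PORT B =====
def bestB (pts : List (Int × Int)) : List Int → PySem.Set Int → Int
  | [], covered => PySem.Set.len covered
  | x :: todo, covered =>
      pts.foldl (fun res p =>
        if p.1 == x then
          let v := bestB pts todo (PySem.Set.add covered p.2)
          if res < v then v else res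
        else res) 0

def solve_alt (lst : List (Int × Int)) : Int :=
  let pts := PySem.List.dedup lst
  let rows := PySem.List.dedup (pts.map Prod.fst)
  let cols := PySem.List.dedup (pts.map Prod.snd)
  (pts.length : Int) - (rows.length : Int) - (cols.length : Int) + bestB pts rows PySem.Set.empty

-- ===== PRECONDITION & SPEC =====
def Spec_solve (lst : List (Int × Int)) (out : Int) : Prop := out = solve_alt lst
instance (lst : List (Int × Int)) (out : Int) : Decidable (Spec_solve lst out) := by unfold Spec_solve; infer_instance

-- ===== CLAIM (what is proved, stated in full; the proofs are below) =====
def Claim_equal_solve : Prop := ∀ (lst : List (Int × Int)), Dom_solve lst → Spec_solve lst (solve lst)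

-- ===== LEMMAS AND PROOFS =====
theorem rf_iff (p : Int × Int) (K : List (Int × Int)) :
    relatively_fake p K = true ↔
      ((∃ z ∈ K, p ≠ z ∧ p.1 = z.1) ∧ (∃ z ∈ K, p ≠ z ∧ p.2 = z.2)) := by
  unfold relatively_fake
  have hfun : (fun (m : Bool × Bool) (z : Int × Int) =>
      if p == z then m
      else (m.1 || p.1 == z.1, m.2 || p.2 == z.2)) =
      (fun (m : Bool × Bool) z =>
        ((fun b zz => b || (!(p == zz) && (p.1 == zz.1))) m.1 z,
         (fun b zz => b || (!(p == zz) && (p.2 == zz.2))) m.2 z)) := by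
    funext m z
    by_cases h : p == z <;> simp [h]
  rw [hfun, PySem.List.foldl_prod_mk
      (f := fun b zz => b || (!(p == zz) && (p.1 == zz.1)))
      (g := fun b zz => b || (!(p == zz) && (p.2 == zz.2)))]
  have horb : ∀ (q : Int × Int → Bool) (b : Bool),
      K.foldl (fun acc z => acc || q z) b = (b || K.any q) := by
    intro q b
    induction K generalizing b with
    | nil => simp
    | cons z t ih => simp [List.foldl_cons, ih, Bool.or_assoc]
  rw [horb, horb]
  simp only [Bool.false_or, Bool.and_eq_true, List.any_eq_true]
  constructor
  · rintro ⟨⟨z1, hz1, h1⟩, ⟨z2, hz2, h2⟩⟩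
    simp only [Bool.not_eq_true', beq_eq_false_iff_ne, beq_iff_eq] at h1 h2
    exact ⟨⟨z1, hz1, h1.1, h1.2⟩, ⟨z2, hz2, h2.1, h2.2⟩⟩
  · rintro ⟨⟨z1, hz1, h1a, h1b⟩, ⟨z2, hz2, h2a, h2b⟩⟩
    refine ⟨⟨z1, hz1, ?_⟩, ⟨z2, hz2, ?_⟩⟩ <;>
      simp_all

theorem bestB_cons (pts : List (Int × Int)) (x : Int) (todo : List Int) (covered : PySem.Set Int) :
    bestB pts (x :: todo) covered =
      (pts.filter (fun p => p.1 == x)).foldl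
        (fun res p => max res (bestB pts todo (PySem.Set.add covered p.2))) 0 := by
  show pts.foldl _ 0 = _
  have h1 : pts.foldl (fun res p =>
        if (p.1 == x) = true then
          have v := bestB pts todo (PySem.Set.add covered p.2);
          if res < v then v else res
        else res) 0 =
      pts.foldl (fun res p =>
        if (p.1 == x) = true then max res (bestB pts todo (PySem.Set.add covered p.2))
        else res) 0 := by
    apply PySem.List.foldl_congr_mem
    intro acc p _
    by_cases h : (p.1 == x) = true
    · simp only [h, if_true]
      by_cases h2 : acc < bestB pts todo (PySem.Set.add covered p.2) <;> simp [h2] <;> omega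
    · simp [h]
  rw [h1, PySem.List.foldl_if_eq_foldl_filter]

theorem foldl_max_attain (f : (Int × Int) → Int) (xs : List (Int × Int)) (init : Int) :
    xs.foldl (fun acc y => max acc (f y)) init = init ∨
      ∃ p ∈ xs, xs.foldl (fun acc y => max acc (f y)) init = f p := by
  induction xs generalizing init with
  | nil => left; rfl
  | cons y t ih =>
    rcases ih (max init (f y)) with h | ⟨p, hp, he⟩
    · simp only [List.foldl_cons] at *
      by_cases hle : f y ≤ init
      · left; rw [h]; omega
      · right; exact ⟨y, List.mem_cons_self, by rw [h]; omega⟩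
    · right; exact ⟨p, List.mem_cons_of_mem _ hp, by simpa using he⟩

theorem bestB_nonneg (pts : List (Int × Int)) (todo : List Int) (covered : PySem.Set Int) :
    0 ≤ bestB pts todo covered := by
  cases todo with
  | nil => simp [bestB, PySem.Set.len]
  | cons x t =>
    rw [bestB_cons]
    exact (PySem.List.le_foldl_max_int _ _ _).1

-- one chosen point per remaining row, taken from K, via projection f
def SelBy (f : Int × Int → Int) (K : List (Int × Int)) : List Int → List (Int × Int) → Prop :=
  List.Forall₂ (fun x p => p ∈ K ∧ f p = x)

theorem selBy_exists (f : Int × Int → Int) (K : List (Int × Int)) (todo : List Int)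
    (h : ∀ x ∈ todo, ∃ p ∈ K, f p = x) : ∃ sel, SelBy f K todo sel := by
  induction todo with
  | nil => exact ⟨[], List.Forall₂.nil⟩
  | cons x t ih =>
    obtain ⟨p, hp, hf⟩ := h x List.mem_cons_self
    obtain ⟨sel, hsel⟩ := ih (fun y hy => h y (List.mem_cons_of_mem _ hy))
    exact ⟨p :: sel, List.Forall₂.cons ⟨hp, hf⟩ hsel⟩

theorem selBy_mem (f : Int × Int → Int) (K : List (Int × Int)) {todo : List Int}
    {sel : List (Int × Int)} (h : SelBy f K todo sel) : ∀ p ∈ sel, p ∈ K := by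
  induction h with
  | nil => simp
  | cons hx _ ih =>
    intro p hp
    rcases List.mem_cons.1 hp with rfl | hp
    · exact hx.1
    · exact ih p hp

theorem selBy_map (f : Int × Int → Int) (K : List (Int × Int)) {todo : List Int}
    {sel : List (Int × Int)} (h : SelBy f K todo sel) : sel.map f = todo := by
  induction h with
  | nil => rfl
  | cons hx _ ih => simp [ih, hx.2]

theorem selBy_cover (f : Int × Int → Int) (K : List (Int × Int)) {todo : List Int}
    {sel : List (Int × Int)} (h : SelBy f K todo sel) :
    ∀ x ∈ todo, ∃ p ∈ sel, f p = x := by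
  induction h with
  | nil => simp
  | cons hx _ ih =>
    intro x hxm
    rcases List.mem_cons.1 hxm with rfl | hxm
    · exact ⟨_, List.mem_cons_self, hx.2⟩
    · obtain ⟨p, hp, he⟩ := ih x hxm
      exact ⟨p, List.mem_cons_of_mem _ hp, he⟩

theorem bestB_ub (pts : List (Int × Int)) {todo : List Int} {sel : List (Int × Int)}
    (h : SelBy Prod.fst pts todo sel) (covered : PySem.Set Int) :
    ((PySem.Set.update covered (sel.map Prod.snd)).length : Int) ≤ bestB pts todo covered := by
  induction h generalizing covered with
  | nil => simp [bestB, PySem.Set.len, PySem.Set.update]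
  | @cons x p t s hx _ ih =>
    rw [bestB_cons]
    have hmem : p ∈ pts.filter (fun q => q.1 == x) := by
      simp [List.mem_filter, hx.1, hx.2]
    have := (PySem.List.le_foldl_max_int (pts.filter (fun q => q.1 == x))
        (fun q => bestB pts t (PySem.Set.add covered q.2)) 0).2 p hmem
    calc ((PySem.Set.update covered ((p :: s).map Prod.snd)).length : Int)
        = ((PySem.Set.update (PySem.Set.add covered p.2) (s.map Prod.snd)).length : Int) := by
          simp [PySem.Set.update]
      _ ≤ bestB pts t (PySem.Set.add covered p.2) := ih _
      _ ≤ _ := this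

theorem bestB_ex (pts : List (Int × Int)) (todo : List Int)
    (h : ∀ x ∈ todo, ∃ p ∈ pts, p.1 = x) (covered : PySem.Set Int) :
    ∃ sel, SelBy Prod.fst pts todo sel ∧
      bestB pts todo covered = ((PySem.Set.update covered (sel.map Prod.snd)).length : Int) := by
  induction todo generalizing covered with
  | nil => exact ⟨[], List.Forall₂.nil, by simp [bestB, PySem.Set.len, PySem.Set.update]⟩
  | cons x t ih =>
    obtain ⟨p0, hp0, hf0⟩ := h x List.mem_cons_self
    have ht : ∀ y ∈ t, ∃ p ∈ pts, p.1 = y := fun y hy => h y (List.mem_cons_of_mem _ hy)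
    rw [bestB_cons]
    rcases foldl_max_attain (fun q => bestB pts t (PySem.Set.add covered q.2))
        (pts.filter (fun q => q.1 == x)) 0 with h0 | ⟨p, hp, he⟩
    · -- result 0: but the value at p0 is sandwiched: 0 ≤ bestB ≤ result = 0
      have hmem : p0 ∈ pts.filter (fun q => q.1 == x) := by
        simp [List.mem_filter, hp0, hf0]
      have hub := (PySem.List.le_foldl_max_int (pts.filter (fun q => q.1 == x))
          (fun q => bestB pts t (PySem.Set.add covered q.2)) 0).2 p0 hmem
      have hnn := bestB_nonneg pts t (PySem.Set.add covered p0.2)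
      obtain ⟨sel, hsel, hval⟩ := ih ht (PySem.Set.add covered p0.2)
      refine ⟨p0 :: sel, List.Forall₂.cons ⟨hp0, hf0⟩ hsel, ?_⟩
      have : bestB pts t (PySem.Set.add covered p0.2) = 0 := by omega
      rw [h0, ← this, hval]
      simp [PySem.Set.update]
    · obtain ⟨hpmem, hpx⟩ := List.mem_filter.1 hp
      obtain ⟨sel, hsel, hval⟩ := ih ht (PySem.Set.add covered p.2)
      refine ⟨p :: sel, List.Forall₂.cons ⟨hpmem, by simpa using hpx⟩ hsel, ?_⟩
      rw [he, hval]
      simp [PySem.Set.update]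

def RowColCov (K : List (Int × Int)) (rows cols : List Int) : Prop :=
  (∀ x ∈ rows, ∃ p ∈ K, p.1 = x) ∧ (∀ y ∈ cols, ∃ p ∈ K, p.2 = y)

theorem nodup_subset_length {α : Type} [DecidableEq α] {l1 l2 : List α}
    (h1 : l1.Nodup) (hs : l1 ⊆ l2) : l1.length ≤ l2.length := by
  calc l1.length = l1.toFinset.card := (List.toFinset_card_of_nodup h1).symm
    _ ≤ l2.toFinset.card := Finset.card_le_card (fun a ha => by
        simp only [List.mem_toFinset] at *; exact hs ha)
    _ ≤ l2.length := l2.toFinset_card_le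

-- distinct-members count: two nodup lists with the same members have the same length
theorem nodup_same_mem_length {α : Type} [DecidableEq α] {l1 l2 : List α}
    (h1 : l1.Nodup) (h2 : l2.Nodup) (h : ∀ a, a ∈ l1 ↔ a ∈ l2) : l1.length = l2.length :=
  List.Perm.length_eq ((List.perm_ext_iff_of_nodup h1 h2).2 h)

-- |K| counts: a nodup sublist splits the length of a nodup list
theorem length_diff_of_sublist {fakes st : List (Int × Int)} (hst : st.Nodup)
    (hsub : fakes.Sublist st) :
    st.length = fakes.length + (PySem.Set.diff st fakes).length := by
  have hfn : fakes.Nodup := hsub.nodup hst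
  have hperm := List.filter_append_perm (fun p => decide (p ∈ fakes)) st
  have h1 : (st.filter (fun p => decide (p ∈ fakes))).length = fakes.length := by
    apply nodup_same_mem_length (hst.filter _) hfn
    intro a
    simp only [List.mem_filter, decide_eq_true_eq]
    exact ⟨fun h => h.2, fun h => ⟨hsub.subset h, h⟩⟩
  have h2 : PySem.Set.diff st fakes = st.filter (fun p => !decide (p ∈ fakes)) := by
    simp [PySem.Set.diff, PySem.Set.contains]
  rw [h2, ← h1]
  have := hperm.length_eq
  simp only [List.length_append] at this
  omega

def rowsOf (pts : List (Int × Int)) : List Int := PySem.List.dedup (pts.map Prod.fst)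
def colsOf (pts : List (Int × Int)) : List Int := PySem.List.dedup (pts.map Prod.snd)

theorem filter_split_len {α : Type} [DecidableEq α] (cols D : List α) :
    cols.length = (cols.filter (fun y => decide (y ∈ D))).length
      + (cols.filter (fun y => !decide (y ∈ D))).length := by
  have := (List.filter_append_perm (fun y => decide (y ∈ D)) cols).length_eq
  simp only [List.length_append] at this
  omega

theorem cov_length_lb (pts K : List (Int × Int)) (hKsub : K ⊆ pts)
    (hcov : RowColCov K (rowsOf pts) (colsOf pts)) :
    ((rowsOf pts).length : Int) + ((colsOf pts).length : Int) - bestB pts (rowsOf pts) PySem.Set.empty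
      ≤ (K.length : Int) := by
  obtain ⟨sel, hsel⟩ := selBy_exists Prod.fst K (rowsOf pts) hcov.1
  have hselpts : SelBy Prod.fst pts (rowsOf pts) sel :=
    List.Forall₂.imp (fun {x p} h => ⟨hKsub h.1, h.2⟩) hsel
  set D : PySem.Set Int := PySem.Set.ofList (sel.map Prod.snd) with hDdef
  have hg : (D.length : Int) ≤ bestB pts (rowsOf pts) PySem.Set.empty := by
    have := bestB_ub pts hselpts PySem.Set.empty
    rwa [PySem.Set.update_empty] at this
  have hselmapfst : sel.map Prod.fst = rowsOf pts := selBy_map _ _ hsel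
  have hselnd : sel.Nodup := by
    have : (sel.map Prod.fst).Nodup := by rw [hselmapfst]; exact PySem.List.nodup_dedup _
    exact this.of_map
  set extras : List Int := (colsOf pts).filter (fun y => !decide (y ∈ D)) with hexdef
  have hexsub : ∀ y ∈ extras, y ∈ colsOf pts := fun y hy => (List.mem_filter.1 hy).1
  obtain ⟨qsel, hqsel⟩ := selBy_exists Prod.snd K extras (fun y hy => hcov.2 y (hexsub y hy))
  have hqmapsnd : qsel.map Prod.snd = extras := selBy_map _ _ hqsel
  have hqnd : qsel.Nodup := by
    have : (qsel.map Prod.snd).Nodup := by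
      rw [hqmapsnd]; exact (PySem.List.nodup_dedup _).filter _
    exact this.of_map
  have hdisj : sel.Disjoint qsel := by
    intro a ha haq
    have h1 : a.2 ∈ D := by
      rw [hDdef, PySem.Set.mem_ofList]
      exact List.mem_map_of_mem ha
    have h2 : a.2 ∈ extras := by rw [← hqmapsnd]; exact List.mem_map_of_mem haq
    rw [hexdef] at h2
    have := (List.mem_filter.1 h2).2
    simp [h1] at this
  have hLnd : (sel ++ qsel).Nodup := List.Nodup.append hselnd hqnd hdisj
  have hLsub : (sel ++ qsel) ⊆ K := by
    intro a ha
    rcases List.mem_append.1 ha with h | h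
    · exact selBy_mem _ _ hsel a h
    · exact selBy_mem _ _ hqsel a h
  have hlen := nodup_subset_length hLnd hLsub
  have hsl : sel.length = (rowsOf pts).length := by
    rw [← hselmapfst]; simp
  have hql : qsel.length = extras.length := by rw [← hqmapsnd]; simp
  have hfl : (colsOf pts).length =
      ((colsOf pts).filter (fun y => decide (y ∈ D))).length + extras.length :=
    filter_split_len _ _
  have hfd : ((colsOf pts).filter (fun y => decide (y ∈ D))).length ≤ D.length := by
    apply nodup_subset_length ((PySem.List.nodup_dedup _).filter _)
    intro y hy
    have := (List.mem_filter.1 hy).2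
    simpa using this
  simp only [List.length_append] at hlen
  omega

theorem cov_exists (pts : List (Int × Int)) :
    ∃ K : List (Int × Int), K.Nodup ∧ K ⊆ pts ∧ RowColCov K (rowsOf pts) (colsOf pts) ∧
      (K.length : Int) ≤ ((rowsOf pts).length : Int) + ((colsOf pts).length : Int)
        - bestB pts (rowsOf pts) PySem.Set.empty := by
  have hrex : ∀ x ∈ rowsOf pts, ∃ p ∈ pts, p.1 = x := by
    intro x hx
    rw [rowsOf, PySem.List.mem_dedup] at hx
    obtain ⟨p, hp, he⟩ := List.mem_map.1 hx
    exact ⟨p, hp, he⟩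
  have hcex : ∀ y ∈ colsOf pts, ∃ p ∈ pts, p.2 = y := by
    intro y hy
    rw [colsOf, PySem.List.mem_dedup] at hy
    obtain ⟨p, hp, he⟩ := List.mem_map.1 hy
    exact ⟨p, hp, he⟩
  obtain ⟨sel, hsel, hval⟩ := bestB_ex pts (rowsOf pts) hrex PySem.Set.empty
  rw [PySem.Set.update_empty] at hval
  set D : PySem.Set Int := PySem.Set.ofList (sel.map Prod.snd) with hDdef
  set extras : List Int := (colsOf pts).filter (fun y => !decide (y ∈ D)) with hexdef
  obtain ⟨qsel, hqsel⟩ := selBy_exists Prod.snd pts extras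
    (fun y hy => hcex y ((List.mem_filter.1 hy).1))
  refine ⟨PySem.Set.ofList (sel ++ qsel), PySem.Set.nodup_ofList _, ?_, ⟨?_, ?_⟩, ?_⟩
  · intro a ha
    rw [PySem.Set.mem_ofList] at ha
    rcases List.mem_append.1 ha with h | h
    · exact selBy_mem _ _ hsel a h
    · exact selBy_mem _ _ hqsel a h
  · intro x hx
    obtain ⟨p, hp, he⟩ := selBy_cover _ _ hsel x hx
    exact ⟨p, by rw [PySem.Set.mem_ofList]; exact List.mem_append_left _ hp, he⟩
  · intro y hy
    by_cases hD : y ∈ D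
    · rw [hDdef, PySem.Set.mem_ofList] at hD
      obtain ⟨p, hp, he⟩ := List.mem_map.1 hD
      exact ⟨p, by rw [PySem.Set.mem_ofList]; exact List.mem_append_left _ hp, he⟩
    · have hyex : y ∈ extras := by
        rw [hexdef]; exact List.mem_filter.2 ⟨hy, by simp [hD]⟩
      obtain ⟨p, hp, he⟩ := selBy_cover _ _ hqsel y hyex
      exact ⟨p, by rw [PySem.Set.mem_ofList]; exact List.mem_append_right _ hp, he⟩
  · have h1 : (PySem.Set.ofList (sel ++ qsel)).length ≤ sel.length + qsel.length := by
      have := PySem.Set.length_ofList_le (sel ++ qsel)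
      simpa using this
    have hsl : sel.length = (rowsOf pts).length := by
      rw [← selBy_map Prod.fst pts hsel]; simp
    have hql : qsel.length = extras.length := by
      rw [← selBy_map Prod.snd pts hqsel]; simp
    have hfl : (colsOf pts).length =
        ((colsOf pts).filter (fun y => decide (y ∈ D))).length + extras.length :=
      filter_split_len _ _
    have hDsub : D.length ≤ ((colsOf pts).filter (fun y => decide (y ∈ D))).length := by
      apply nodup_subset_length (PySem.Set.nodup_ofList _)
      intro y hy
      have hy' : y ∈ sel.map Prod.snd := (PySem.Set.mem_ofList _ _).1 hy
      obtain ⟨p, hp, he⟩ := List.mem_map.1 hy'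
      apply List.mem_filter.2
      constructor
      · rw [colsOf, PySem.List.mem_dedup]
        exact he ▸ List.mem_map_of_mem (selBy_mem _ _ hsel p hp)
      · simp only [decide_eq_true_eq]
        exact hy
    omega

theorem diff_eq_filter (s t : List (Int × Int)) :
    PySem.Set.diff s t = s.filter (fun x => !decide (x ∈ t)) := by
  simp [PySem.Set.diff, PySem.Set.contains]

theorem length_diff_of_subset {K st : List (Int × Int)} (hst : st.Nodup)
    (hK : K.Nodup) (hsub : K ⊆ st) :
    st.length = K.length + (PySem.Set.diff st K).length := by
  have hperm := List.filter_append_perm (fun p => decide (p ∈ K)) st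
  have h1 : (st.filter (fun p => decide (p ∈ K))).length = K.length := by
    apply nodup_same_mem_length (hst.filter _) hK
    intro a
    simp only [List.mem_filter, decide_eq_true_eq]
    exact ⟨fun h => h.2, fun h => ⟨hsub h, h⟩⟩
  rw [diff_eq_filter, ← h1]
  have := hperm.length_eq
  simp only [List.length_append] at this
  omega

def checkB (st fakes : List (Int × Int)) : Bool :=
  fakes.all (fun pair => relatively_fake pair (PySem.Set.diff st (PySem.Set.ofList fakes)))

theorem valid_iff_cov {st fakes : List (Int × Int)} (hst : st.Nodup)
    (hsub : fakes.Sublist st) :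
    checkB st fakes = true ↔ RowColCov (PySem.Set.diff st fakes) (rowsOf st) (colsOf st) := by
  have hfn : fakes.Nodup := hsub.nodup hst
  unfold checkB
  simp only [PySem.Set.ofList_eq_self_of_nodup _ hfn, List.all_eq_true]
  constructor
  · intro h
    constructor
    · intro x hx
      rw [rowsOf, PySem.List.mem_dedup] at hx
      obtain ⟨p0, hp0, he⟩ := List.mem_map.1 hx
      by_cases hf : p0 ∈ fakes
      · obtain ⟨⟨z, hz, _, h1⟩, _⟩ := (rf_iff p0 _).1 (h p0 hf)
        exact ⟨z, hz, by rw [← h1, he]⟩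
      · exact ⟨p0, (PySem.Set.mem_diff _ _ _).2 ⟨hp0, hf⟩, he⟩
    · intro y hy
      rw [colsOf, PySem.List.mem_dedup] at hy
      obtain ⟨p0, hp0, he⟩ := List.mem_map.1 hy
      by_cases hf : p0 ∈ fakes
      · obtain ⟨_, ⟨z, hz, _, h2⟩⟩ := (rf_iff p0 _).1 (h p0 hf)
        exact ⟨z, hz, by rw [← h2, he]⟩
      · exact ⟨p0, (PySem.Set.mem_diff _ _ _).2 ⟨hp0, hf⟩, he⟩
  · intro hcov p hp
    have hpst : p ∈ st := hsub.subset hp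
    apply (rf_iff p _).2
    constructor
    · have hx : p.1 ∈ rowsOf st := by
        rw [rowsOf, PySem.List.mem_dedup]; exact List.mem_map_of_mem hpst
      obtain ⟨z, hz, he⟩ := hcov.1 _ hx
      have hznf : z ∉ fakes := ((PySem.Set.mem_diff _ _ _).1 hz).2
      exact ⟨z, hz, fun hEq => hznf (hEq ▸ hp), he.symm⟩
    · have hy : p.2 ∈ colsOf st := by
        rw [colsOf, PySem.List.mem_dedup]; exact List.mem_map_of_mem hpst
      obtain ⟨z, hz, he⟩ := hcov.2 _ hy
      have hznf : z ∉ fakes := ((PySem.Set.mem_diff _ _ _).1 hz).2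
      exact ⟨z, hz, fun hEq => hznf (hEq ▸ hp), he.symm⟩

def Vval (st : List (Int × Int)) : Int :=
  (st.length : Int) - ((rowsOf st).length : Int) - ((colsOf st).length : Int)
    + bestB st (rowsOf st) PySem.Set.empty

theorem P_iff {st : List (Int × Int)} (hst : st.Nodup) (r : Nat) :
    (∃ fakes, fakes.Sublist st ∧ fakes.length = r ∧ checkB st fakes = true)
      ↔ (r : Int) ≤ Vval st := by
  constructor
  · rintro ⟨fakes, hsub, hlen, hchk⟩
    have hcov := (valid_iff_cov hst hsub).1 hchk
    have hKsub : (PySem.Set.diff st fakes) ⊆ st := by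
      intro z hz; exact ((PySem.Set.mem_diff _ _ _).1 hz).1
    have hlb := cov_length_lb st _ hKsub hcov
    have hsplit := length_diff_of_sublist hst hsub
    unfold Vval
    omega
  · intro hr
    obtain ⟨K, hKnd, hKsub, hKcov, hKlen⟩ := cov_exists st
    have hsplit := length_diff_of_subset hst hKnd hKsub
    have hrle : r ≤ (PySem.Set.diff st K).length := by
      unfold Vval at hr
      omega
    refine ⟨(PySem.Set.diff st K).take r, ?_, ?_, ?_⟩
    · exact (List.take_sublist _ _).trans (by rw [diff_eq_filter]; exact List.filter_sublist)
    · rw [List.length_take]; omega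
    · rw [valid_iff_cov hst
        ((List.take_sublist _ _).trans (by rw [diff_eq_filter]; exact List.filter_sublist))]
      have hKsub2 : K ⊆ PySem.Set.diff st ((PySem.Set.diff st K).take r) := by
        intro z hz
        apply (PySem.Set.mem_diff _ _ _).2
        refine ⟨hKsub hz, fun hzf => ?_⟩
        have : z ∈ PySem.Set.diff st K := (List.take_subset _ _) hzf
        exact ((PySem.Set.mem_diff _ _ _).1 this).2 hz
      exact ⟨fun x hx => (hKcov.1 x hx).imp (fun p hp => ⟨hKsub2 hp.1, hp.2⟩),
             fun y hy => (hKcov.2 y hy).imp (fun p hp => ⟨hKsub2 hp.1, hp.2⟩)⟩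

theorem pyRange_desc_cons (a : Int) (h : 0 ≤ a) :
    PySem.List.pyRange a (-1) (-1) = a :: PySem.List.pyRange (a - 1) (-1) (-1) := by
  simp only [PySem.List.pyRange]
  norm_num
  have hif1 : (if (-1:Int) < a then (a+1).toNat else 0) = a.toNat + 1 := by split <;> omega
  have hif2 : (if (0:Int) < a then a.toNat else 0) = a.toNat := by split <;> omega
  rw [hif1, hif2, List.range_succ_eq_map, List.map_cons, List.map_map]
  congr 1
  · norm_num
  · apply List.map_congr_left
    intro k _
    simp only [Function.comp_apply]
    push_cast
    ring

theorem solveLoop_eq (st : List (Int × Int)) (hst : st.Nodup) (V : Int) (hV : V = Vval st)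
    (h0 : 0 ≤ V) : ∀ n : Nat, V ≤ (n : Int) →
      solveLoop st (PySem.List.pyRange (n : Int) (-1) (-1)) = V := by
  intro n
  induction n with
  | zero =>
    intro hn
    have hV0 : V = 0 := le_antisymm (by exact_mod_cast hn) h0
    push_cast
    rw [pyRange_desc_cons 0 le_rfl]
    show (if (PySem.List.combinations st (0:Int).toNat).any _ then (0:Int) else _) = V
    rw [if_pos ?_, hV0]
    have hP : (∃ fakes, fakes.Sublist st ∧ fakes.length = 0 ∧ checkB st fakes = true) :=
      ⟨[], List.nil_sublist st, rfl, rfl⟩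
    rw [List.any_eq_true]
    obtain ⟨fakes, hsub, hlen, hchk⟩ := hP
    exact ⟨fakes, (PySem.List.mem_combinations_iff st _ fakes).2 ⟨hsub, hlen⟩, hchk⟩
  | succ m ih =>
    intro hn
    push_cast
    rw [pyRange_desc_cons _ (by positivity)]
    show (if (PySem.List.combinations st ((m:Int)+1).toNat).any _ then ((m:Int)+1) else
      solveLoop st (PySem.List.pyRange ((m:Int)+1-1) (-1) (-1))) = V
    by_cases hle : ((m:Int) + 1) ≤ V
    · have heq : ((m:Int) + 1) = V := le_antisymm hle (by exact_mod_cast hn)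
      rw [if_pos ?_, heq]
      rw [List.any_eq_true]
      have hP : ((((m:Int)+1).toNat : Int) ≤ Vval st) := by rw [← hV]; omega
      obtain ⟨fakes, hsub, hlen, hchk⟩ := (P_iff hst _).2 hP
      exact ⟨fakes, (PySem.List.mem_combinations_iff st _ fakes).2 ⟨hsub, hlen⟩, hchk⟩
    · rw [if_neg ?_]
      · have : ((m:Int) + 1 - 1) = (m : Int) := by ring
        rw [this]
        exact ih (by omega)
      · rw [List.any_eq_true]
        rintro ⟨fakes, hmem, hchk⟩
        obtain ⟨hsub, hlen⟩ := (PySem.List.mem_combinations_iff st _ fakes).1 hmem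
        have := (P_iff hst (((m:Int)+1).toNat)).1 ⟨fakes, hsub, hlen, hchk⟩
        rw [← hV] at this
        omega

theorem solve_eq_alt (lst : List (Int × Int)) : solve lst = solve_alt lst := by
  have hst : (PySem.Set.ofList lst).Nodup := PySem.Set.nodup_ofList lst
  set st : List (Int × Int) := PySem.Set.ofList lst with hstdef
  have halt : solve_alt lst = Vval st := rfl
  have h0 : (0:Int) ≤ Vval st :=
    (P_iff hst 0).1 ⟨[], List.nil_sublist st, rfl, rfl⟩
  have hVn : Vval st ≤ (lst.length : Int) := by
    obtain ⟨fakes, hsub, hlen, _⟩ := (P_iff hst ((Vval st).toNat)).2 (by omega)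
    have h1 : fakes.length ≤ st.length := hsub.length_le
    have h2 : st.length ≤ lst.length := PySem.Set.length_ofList_le lst
    omega
  rw [halt]
  exact solveLoop_eq st hst (Vval st) rfl h0 lst.length hVn

-- ===== VERDICT (by name: the statement is the Claim_ definition above) =====
theorem solve_spec : Claim_equal_solve := by
  intro lst _
  unfold Spec_solve
  exact solve_eq_alt lst
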